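-- pv_equiv track=rewrite | github.com/stankv/Studing | Clear_Code/VariableNames3.py | SherlockValidString
-- ===== SOURCE A (Python) =====
-- def SherlockValidString(s):
--
--     S = []
--     si = []
--     si.append(s[0])
--     i = 1
--     si.append(i)
--     S.append(si)
--     si =[]
--     while(i < len(s)):
--         done = False    # было flag
--         for j in range(len(S)):
--             if s[i] == S[j][0]:
--                 S[j][1] += 1
--                 done = True
--                 break
--         if done:
--             i += 1
--             continue
--         si.append(s[i])
--         si.append(1)
--         S.append(si)
--         si = []
--         i += 1
--
--     # формируем массив - количества вхождений букв
--     L = []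
--     for i in range(len(S)):
--         L.append(S[i][1])
--
--     # проверяем равно ли количество вхождений для каждой из букв
--     success = True
--     for i in range(len(L)):
--         if L[i] == L[0]:
--             found = True    # было flag
--         else:
--             found = False
--             break
--     if found:
--         return success
--     # если убрать одну букву - станет ли количество вхождений равным
--     success = False
--     for i in range(len(L)):
--         L1 = []
--         for j in range(len(L)):
--             L1.append(L[j])
--         L1[i] = L1[i] - 1
--         if L1[i] == 0:
--             L1.pop(i)
--         for j in range(len(L1)):
--             if L1[j] == L1[0]:
--                 found = True
--             else:
--                 found = False
--                 break
--         if found: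
--             success = True
--             return success
--     return success
-- ===== SOURCE B (Python) =====
-- def SherlockValidString(s):
--     # One pass over s building a char->count dict (no inner scan), then an O(k)
--     # frequency check via min/max/count instead of A's per-index trial removals.
--     cnt = {}
--     for ch in s:
--         cnt[ch] = cnt.get(ch, 0) + 1
--     vals = list(cnt.values())
--     m, M = min(vals), max(vals)
--     return (m == M
--             or (M == m + 1 and vals.count(M) == 1)
--             or (m == 1 and vals.count(1) == 1 and vals.count(M) == len(vals) - 1))
-- ===== Notes on version B (the rewrite author's own statement) =====
-- stated objective: faster
-- what changed: B counts characters in one dict pass and decides validity by a closed-form min/max/count test on the count list, replacing A's linear scan of the count table per character and its per-index copy-decrement-recheck removal loop.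
import Mathlib
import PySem

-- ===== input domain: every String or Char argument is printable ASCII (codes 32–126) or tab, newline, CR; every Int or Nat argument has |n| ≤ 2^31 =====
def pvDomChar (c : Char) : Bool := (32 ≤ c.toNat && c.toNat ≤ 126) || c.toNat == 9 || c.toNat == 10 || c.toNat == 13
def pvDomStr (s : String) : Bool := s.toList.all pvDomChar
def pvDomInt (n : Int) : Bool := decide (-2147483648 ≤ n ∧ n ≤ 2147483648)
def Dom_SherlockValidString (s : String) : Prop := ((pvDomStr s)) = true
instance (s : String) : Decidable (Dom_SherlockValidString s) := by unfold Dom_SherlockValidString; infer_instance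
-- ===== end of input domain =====

-- B replaces A's quadratic count-table scans with one dict-counting pass and a
-- closed-form min/max/count frequency test; equivalence is proved for nonempty s.

-- ===== PORT A =====
-- the inner 'for j in range(len(S))' loop: bump the first entry whose letter matches,
-- otherwise (no break fired) the new pair [c, 1] is appended at the end
def aBump : List (Char × Int) → Char → List (Char × Int)
  | [], c => [(c, 1)]
  | (a, n) :: rest, c => if c = a then (a, n + 1) :: rest else (a, n) :: aBump rest c

-- the all-equal check loop: compares each L[i] with L[0], breaking at the first mismatch
def aAllEq (L : List Int) : Bool :=
  match L with
  | [] => true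
  | l0 :: _ => L.all (fun x => x == l0)

-- one iteration of the removal loop: copy L, decrement entry i, pop it if it became 0
def aDec (L : List Int) (i : Nat) : List Int :=
  let L1 := L.set i (L.getD i 0 - 1)
  if L1.getD i 0 == 0 then L1.eraseIdx i else L1

def SherlockValidString (s : String) : Bool :=
  match s.toList with
  | [] => false   -- unreachable under Pre_: Python raises IndexError at s[0]
  | c0 :: rest =>
    let S := rest.foldl aBump [(c0, (1 : Int))]
    let L := S.map (·.2)
    if aAllEq L then true
    else (List.range L.length).any (fun i => aAllEq (aDec L i))

-- ===== PORT B =====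
def SherlockValidString_alt (s : String) : Bool :=
  let cnt := s.toList.foldl (fun d c => d.modify c 0 (· + 1)) (PySem.Dict.empty : PySem.Dict Char Int)
  let vals := cnt.values
  match PySem.List.min? vals (fun v => v), PySem.List.max? vals (fun v => v) with
  | some m, some M =>
      (m == M) ||
      (M == m + 1 && ((PySem.List.count vals M : Int) == 1)) ||
      (m == 1 && ((PySem.List.count vals 1 : Int) == 1) &&
        ((PySem.List.count vals M : Int) == (vals.length : Int) - 1))
  | _, _ => false  -- vals = []: Python's min([]) raises ValueError; unreachable under Pre_

-- ===== PRECONDITION & SPEC =====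
-- Pre_ excludes only the empty string, on which A raises IndexError (and B ValueError).
def Pre_SherlockValidString (s : String) : Prop := s.toList ≠ []
instance (s : String) : Decidable (Pre_SherlockValidString s) := by unfold Pre_SherlockValidString; infer_instance
def pvWitness_SherlockValidString : String := "aabbccc"

def Spec_SherlockValidString (s : String) (out : Bool) : Prop := out = SherlockValidString_alt s
instance (s : String) (out : Bool) : Decidable (Spec_SherlockValidString s out) := by unfold Spec_SherlockValidString; infer_instance

-- ===== CLAIM (what is proved, stated in full; the proofs are below) =====
def Claim_equal_SherlockValidString : Prop := ∀ (s : String), Dom_SherlockValidString s → Pre_SherlockValidString s → Spec_SherlockValidString s (SherlockValidString s)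

-- ===== LEMMAS AND PROOFS =====

-- all-same predicate (order- and permutation-invariant reading of the all-equal loop)
def AllSame (K : List Int) : Prop := ∀ x ∈ K, ∀ y ∈ K, x = y

lemma aAllEq_iff (K : List Int) : aAllEq K = true ↔ AllSame K := by
  cases K with
  | nil => simp [aAllEq, AllSame]
  | cons l0 t =>
    simp only [aAllEq, List.all_eq_true, beq_iff_eq, AllSame]
    constructor
    · intro h x hx y hy; rw [h x hx, h y hy]
    · intro h x hx; exact h x hx l0 List.mem_cons_self

-- the canonical count table: distinct letters in first-occurrence order with their counts
def ctab (p : List Char) : List (Char × Int) :=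
  (PySem.List.dedup p).map (fun k => (k, (p.count k : Int)))

lemma aBump_not_mem (S : List (Char × Int)) (c : Char) (h : ∀ x ∈ S, x.1 ≠ c) :
    aBump S c = S ++ [(c, 1)] := by
  induction S with
  | nil => rfl
  | cons x t ih =>
    obtain ⟨a, n⟩ := x
    have ha : a ≠ c := h (a, n) List.mem_cons_self
    simp only [aBump, if_neg (fun hh : c = a => ha hh.symm), List.cons_append]
    rw [ih (fun y hy => h y (List.mem_cons_of_mem _ hy))]

lemma aBump_mem (K : List Char) (g : Char → Int) (c : Char) (hnd : K.Nodup) (hc : c ∈ K) :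
    aBump (K.map (fun k => (k, g k))) c
      = K.map (fun k => (k, g k + if k = c then 1 else 0)) := by
  induction K with
  | nil => cases hc
  | cons k K' ih =>
    by_cases hk : k = c
    · subst hk
      have hnotin : k ∉ K' := (List.nodup_cons.mp hnd).1
      have e1 : aBump (List.map (fun k => (k, g k)) (k :: K')) k
          = (k, g k + 1) :: List.map (fun k => (k, g k)) K' := by
        simp [aBump]
      rw [e1, List.map_cons, if_pos rfl]
      congr 1
      apply List.map_congr_left
      intro a ha
      have hak : ¬ a = k := fun h => hnotin (h ▸ ha)
      simp [hak]
    · have hc' : c ∈ K' := by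
        rcases List.mem_cons.mp hc with h | h
        · exact absurd h.symm hk
        · exact h
      simp only [List.map_cons, aBump, if_neg (fun hh : c = k => hk hh.symm), if_neg hk]
      rw [ih (List.nodup_cons.mp hnd).2 hc']
      simp

lemma count_append_singleton_int (p : List Char) (c k : Char) :
    (((p ++ [c]).count k : Int)) = (p.count k : Int) + if k = c then 1 else 0 := by
  simp only [List.count_append, List.count_singleton, beq_iff_eq]
  push_cast
  split_ifs with h1 h2 h2
  · ring
  · exact absurd h1.symm h2
  · exact absurd h2.symm h1
  · ring

lemma aBump_ctab (p : List Char) (c : Char) : aBump (ctab p) c = ctab (p ++ [c]) := by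
  by_cases hc : c ∈ p
  · have hc' : c ∈ PySem.List.dedup p := (PySem.List.mem_dedup p c).mpr hc
    rw [ctab, aBump_mem _ _ _ (PySem.List.nodup_dedup p) hc', ctab]
    have hd : PySem.List.dedup (p ++ [c]) = PySem.List.dedup p := by
      rw [PySem.List.dedup_eq_ofList, PySem.List.dedup_eq_ofList,
        PySem.Set.ofList_append_singleton,
        PySem.Set.add_of_mem ((PySem.Set.mem_ofList p c).mpr hc)]
    rw [hd]
    apply List.map_congr_left
    intro k _
    simp only [Prod.mk.injEq, true_and]
    exact (count_append_singleton_int p c k).symm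
  · have hc' : c ∉ PySem.List.dedup p := fun h => hc ((PySem.List.mem_dedup p c).mp h)
    rw [ctab, aBump_not_mem _ _ (by
      intro x hx h
      apply hc'
      rcases List.mem_map.mp hx with ⟨k, hk, rfl⟩
      exact h ▸ hk), ctab]
    have hd : PySem.List.dedup (p ++ [c]) = PySem.List.dedup p ++ [c] := by
      rw [PySem.List.dedup_eq_ofList, PySem.List.dedup_eq_ofList,
        PySem.Set.ofList_append_singleton,
        PySem.Set.add_of_not_mem (fun h => hc ((PySem.Set.mem_ofList p c).mp h))]
    rw [hd, List.map_append]
    congr 1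
    · apply List.map_congr_left
      intro k hk
      have hkc : ¬ k = c := fun h => hc (h ▸ (PySem.List.mem_dedup p k).mp hk)
      simp only [Prod.mk.injEq, true_and]
      rw [count_append_singleton_int p c k, if_neg hkc, add_zero]
    · have h0 : p.count c = 0 := List.count_eq_zero.mpr hc
      simp [h0]

lemma aFold (cs p : List Char) : cs.foldl aBump (ctab p) = ctab (p ++ cs) := by
  induction cs generalizing p with
  | nil => simp
  | cons c cs ih =>
    rw [List.foldl_cons, aBump_ctab, ih]
    simp

lemma set_perm (L : List Int) (i : Nat) (a : Int) (h : i < L.length) :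
    (L.set i a).Perm (a :: L.eraseIdx i) := by
  induction L generalizing i with
  | nil => simp at h
  | cons x t ih =>
    cases i with
    | zero => simp
    | succ i =>
      simp only [List.set_cons_succ, List.eraseIdx_cons_succ]
      exact ((ih i (by simpa using h)).cons x).trans (List.Perm.swap a x _)

lemma getElem_cons_perm (L : List Int) (i : Nat) (h : i < L.length) :
    L.Perm (L[i] :: L.eraseIdx i) := by
  have h2 := set_perm L i L[i] h
  rwa [List.set_getElem_self h] at h2

lemma aDec_eq (L : List Int) (i : Nat) (h : i < L.length) :
    aDec L i = if L[i] = 1 then L.eraseIdx i else L.set i (L[i] - 1) := by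
  unfold aDec
  have h1 : L.getD i 0 = L[i] := List.getD_eq_getElem L 0 h
  have hlen : i < (L.set i (L[i] - 1)).length := by simpa using h
  have h2 : (L.set i (L[i] - 1)).getD i 0 = L[i] - 1 := by
    rw [List.getD_eq_getElem _ 0 hlen, List.getElem_set_self hlen]
  simp only [h1, h2, beq_iff_eq, List.eraseIdx_set_eq]
  split_ifs with ha hb hb
  · rfl
  · omega
  · omega
  · rfl

lemma allSame_of_perm {K K' : List Int} (h : K.Perm K') : AllSame K ↔ AllSame K' := by
  unfold AllSame
  constructor <;> intro hA x hx y hy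
  · exact hA x (h.mem_iff.mpr hx) y (h.mem_iff.mpr hy)
  · exact hA x (h.mem_iff.mp hx) y (h.mem_iff.mp hy)

lemma allSame_short (K : List Int) (h : K.length ≤ 1) : AllSame K := by
  cases K with
  | nil => intro x hx; cases hx
  | cons a t =>
    cases t with
    | nil =>
      intro x hx y hy
      simp only [List.mem_singleton] at hx hy
      rw [hx, hy]
    | cons b t' => simp at h

-- the core combinatorial fact: A's all-equal-or-one-removal test equals B's
-- min/max/count test, for any nonempty list of positive counts
lemma core (L : List Int) (hne : L ≠ []) (hpos : ∀ x ∈ L, 1 ≤ x)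
    (m M : Int) (hm : m ∈ L) (hmle : ∀ x ∈ L, m ≤ x) (hM : M ∈ L) (hMge : ∀ x ∈ L, x ≤ M) :
    ((if aAllEq L then true else (List.range L.length).any (fun i => aAllEq (aDec L i))))
    = ((m == M) ||
      (M == m + 1 && ((L.count M : Int) == 1)) ||
      (m == 1 && ((L.count 1 : Int) == 1) && ((L.count M : Int) == (L.length : Int) - 1))) := by
  have key :
      (AllSame L ∨ ∃ i, i < L.length ∧ aAllEq (aDec L i) = true) ↔
      (m = M ∨ (M = m + 1 ∧ (L.count M : Int) = 1) ∨
        (m = 1 ∧ (L.count 1 : Int) = 1 ∧ (L.count M : Int) = (L.length : Int) - 1)) := by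
    constructor
    · rintro (hAll | ⟨i, hi, hDec⟩)
      · exact Or.inl (hAll m hm M hM)
      · by_cases hA : AllSame L
        · exact Or.inl (hA m hm M hM)
        have hlen : 2 ≤ L.length := by
          by_contra hle
          exact hA (allSame_short L (by omega))
        have hperm : L.Perm (L[i] :: L.eraseIdx i) := getElem_cons_perm L i hi
        have hRlen : (L.eraseIdx i).length = L.length - 1 := List.length_eraseIdx_of_lt hi
        have hRne : L.eraseIdx i ≠ [] := by
          intro h0
          rw [h0] at hRlen
          simp at hRlen
          omega
        have hvpos : 1 ≤ L[i] := hpos _ (List.getElem_mem hi)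
        rw [aDec_eq L i hi] at hDec
        by_cases hv1 : L[i] = 1
        · rw [if_pos hv1] at hDec
          have hSame : AllSame (L.eraseIdx i) := (aAllEq_iff _).mp hDec
          obtain ⟨w, hw⟩ := List.exists_mem_of_ne_nil _ hRne
          have hRw : ∀ x ∈ L.eraseIdx i, x = w := fun x hx => hSame x hx w hw
          have hwL : w ∈ L := List.mem_of_mem_eraseIdx hw
          have h1L : (1 : Int) ∈ L := hv1 ▸ List.getElem_mem hi
          have hw1 : w ≠ 1 := by
            intro h1
            apply hA
            intro x hx y hy
            have hx' : x = 1 := by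
              rcases List.mem_cons.mp (hperm.mem_iff.mp hx) with h | h
              · rw [h, hv1]
              · rw [hRw x h, h1]
            have hy' : y = 1 := by
              rcases List.mem_cons.mp (hperm.mem_iff.mp hy) with h | h
              · rw [h, hv1]
              · rw [hRw y h, h1]
            rw [hx', hy']
          have hwpos : 1 ≤ w := hpos w hwL
          have hm1 : m = 1 := le_antisymm (hmle 1 h1L) (hpos m hm)
          have hMw : M = w := by
            rcases List.mem_cons.mp (hperm.mem_iff.mp hM) with h | h
            · exfalso
              have := hMge w hwL
              rw [h, hv1] at this
              omega
            · exact hRw M h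
          have hcnt1 : L.count 1 = 1 := by
            have hc := hperm.count 1
            have hz : (L.eraseIdx i).count 1 = 0 :=
              List.count_eq_zero.mpr (fun h => hw1 ((hRw 1 h).symm ▸ rfl))
            rw [List.count_cons, hz, hv1] at hc
            simpa using hc
          have hcntM : L.count M = (L.eraseIdx i).length := by
            have hc := hperm.count M
            have hzz : (L.eraseIdx i).count M = (L.eraseIdx i).length :=
              List.count_eq_length.mpr (fun b hb => (hRw b hb).symm ▸ hMw)
            rw [List.count_cons, hzz, hv1] at hc
            have : ¬ ((1 : Int) == M) = true := by
              simp only [beq_iff_eq]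
              rw [hMw]
              exact fun h => hw1 h.symm
            rw [if_neg this] at hc
            simpa using hc
          refine Or.inr (Or.inr ⟨hm1, by exact_mod_cast hcnt1, ?_⟩)
          rw [hcntM, hRlen]
          push_cast [Nat.cast_sub (by omega : 1 ≤ L.length)]
          ring
        · rw [if_neg hv1] at hDec
          have hSame : AllSame ((L[i] - 1) :: L.eraseIdx i) :=
            (allSame_of_perm (set_perm L i (L[i] - 1) hi)).mp ((aAllEq_iff _).mp hDec)
          have hRv : ∀ x ∈ L.eraseIdx i, x = L[i] - 1 := fun x hx =>
            hSame x (List.mem_cons_of_mem _ hx) (L[i] - 1) List.mem_cons_self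
          obtain ⟨w, hw⟩ := List.exists_mem_of_ne_nil _ hRne
          have hv1L : L[i] - 1 ∈ L := (hRv w hw) ▸ List.mem_of_mem_eraseIdx hw
          have hviL : L[i] ∈ L := List.getElem_mem hi
          have hMv : M = L[i] := by
            rcases List.mem_cons.mp (hperm.mem_iff.mp hM) with h | h
            · exact h
            · exfalso
              have h1 := hRv M h
              have h2 := hMge _ hviL
              omega
          have hmv : m = L[i] - 1 := by
            rcases List.mem_cons.mp (hperm.mem_iff.mp hm) with h | h
            · exfalso
              have h2 := hmle _ hv1L
              omega
            · exact hRv m h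
          have hcntM : L.count M = 1 := by
            rw [hMv]
            have hc := hperm.count L[i]
            have hz : (L.eraseIdx i).count L[i] = 0 :=
              List.count_eq_zero.mpr (fun h => by
                have := hRv _ h
                omega)
            rw [List.count_cons, hz] at hc
            simpa using hc
          exact Or.inr (Or.inl ⟨by omega, by exact_mod_cast hcntM⟩)
    · have allsame_of_mM : m = M → AllSame L := by
        intro hmM x hx y hy
        have h1 := hmle x hx
        have h2 := hMge x hx
        have h3 := hmle y hy
        have h4 := hMge y hy
        omega
      rintro (hmM | ⟨hM1, hcM⟩ | ⟨hm1, hc1, hcM⟩)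
      · exact Or.inl (allsame_of_mM hmM)
      · right
        have hmpos : 1 ≤ m := hpos m hm
        obtain ⟨i, hi, hiM⟩ := List.mem_iff_getElem.mp hM
        refine ⟨i, hi, ?_⟩
        rw [aDec_eq L i hi, hiM, if_neg (by omega : ¬ M = 1), aAllEq_iff,
          allSame_of_perm (set_perm L i (M - 1) hi)]
        have hpermL := getElem_cons_perm L i hi
        rw [hiM] at hpermL
        have hcMn : L.count M = 1 := by exact_mod_cast hcM
        have hRM : (L.eraseIdx i).count M = 0 := by
          have hc := hpermL.count M
          rw [List.count_cons] at hc
          simp only [beq_self_eq_true, if_pos] at hc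
          omega
        have keyv : ∀ z ∈ (M - 1) :: L.eraseIdx i, z = m := by
          intro z hz
          rcases List.mem_cons.mp hz with rfl | hz'
          · omega
          · have hzL : z ∈ L := List.mem_of_mem_eraseIdx hz'
            have h1 := hmle z hzL
            have h2 := hMge z hzL
            have hzM : z ≠ M := by
              intro h
              subst h
              have := List.count_pos_iff.mpr hz'
              omega
            omega
        intro x hx y hy
        rw [keyv x hx, keyv y hy]
      · by_cases hmM : m = M
        · exact Or.inl (allsame_of_mM hmM)
        right
        have hM1 : M ≠ 1 := fun h => hmM (by rw [hm1, h])
        have hc1n : L.count 1 = 1 := by exact_mod_cast hc1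
        have hcMn : L.count M = L.length - 1 ∧ 1 ≤ L.length := by
          have hle : L.count M ≤ L.length := List.count_le_length
          have hlp : L ≠ [] := hne
          have hlen1 : 1 ≤ L.length := List.length_pos_iff.mpr hlp
          constructor
          · omega
          · exact hlen1
        have h1L : (1 : Int) ∈ L := List.count_pos_iff.mp (by omega)
        obtain ⟨i, hi, hi1⟩ := List.mem_iff_getElem.mp h1L
        refine ⟨i, hi, ?_⟩
        rw [aDec_eq L i hi, hi1, if_pos rfl, aAllEq_iff]
        have hpermL := getElem_cons_perm L i hi
        rw [hi1] at hpermL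
        have hR1 : (L.eraseIdx i).count 1 = 0 := by
          have hc := hpermL.count 1
          rw [List.count_cons] at hc
          simp only [beq_self_eq_true, if_pos] at hc
          omega
        have keyv : ∀ z ∈ L.eraseIdx i, z = M := by
          intro z hz
          by_contra hzM
          have hz1 : z ≠ 1 := by
            intro h
            subst h
            have := List.count_pos_iff.mpr hz
            omega
          have hzL : z ∈ L := List.mem_of_mem_eraseIdx hz
          have hsplit := List.length_eq_countP_add_countP (fun y => y == M) (l := L)
          have hcnt_eq : L.countP (fun y => y == M) = L.count M := rfl
          have hlenF : (L.filter (fun y => decide ¬(y == M) = true)).length = 1 := by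
            rw [← List.countP_eq_length_filter]
            omega
          obtain ⟨a, ha⟩ := List.length_eq_one_iff.mp hlenF
          have h1F : (1 : Int) ∈ L.filter (fun y => decide ¬(y == M) = true) := by
            rw [List.mem_filter]
            refine ⟨h1L, ?_⟩
            simp only [beq_iff_eq, decide_eq_true_eq]
            exact fun h => hM1 h.symm
          have hzF : z ∈ L.filter (fun y => decide ¬(y == M) = true) := by
            rw [List.mem_filter]
            refine ⟨hzL, ?_⟩
            simp only [beq_iff_eq, decide_eq_true_eq]
            exact hzM
          rw [ha, List.mem_singleton] at h1F hzF
          exact hz1 (by rw [hzF, ← h1F])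
        intro x hx y hy
        rw [keyv x hx, keyv y hy]
  rw [Bool.eq_iff_iff]
  constructor
  · intro h
    have h' : AllSame L ∨ ∃ i, i < L.length ∧ aAllEq (aDec L i) = true := by
      by_cases hA : aAllEq L = true
      · exact Or.inl ((aAllEq_iff L).mp hA)
      · rw [if_neg hA] at h
        simp only [List.any_eq_true, List.mem_range] at h
        obtain ⟨i, hi, hd⟩ := h
        exact Or.inr ⟨i, hi, hd⟩
    have := key.mp h'
    simp only [Bool.or_eq_true, Bool.and_eq_true, beq_iff_eq]
    tauto
  · intro h
    simp only [Bool.or_eq_true, Bool.and_eq_true, beq_iff_eq] at h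
    have h' := key.mpr (by tauto)
    rcases h' with hAll | ⟨i, hi, hd⟩
    · rw [if_pos ((aAllEq_iff L).mpr hAll)]
    · by_cases hA : aAllEq L = true
      · rw [if_pos hA]
      · rw [if_neg hA]
        simp only [List.any_eq_true, List.mem_range]
        exact ⟨i, hi, hd⟩

-- ===== VERDICT (by name: the statement is the Claim_ definition above) =====
lemma ctab_init (c0 : Char) : [(c0, (1 : Int))] = ctab [c0] := by
  rw [ctab, PySem.List.dedup_eq_ofList,
    PySem.Set.ofList_eq_self_of_nodup _ (List.nodup_singleton c0)]
  simp

theorem SherlockValidString_spec : Claim_equal_SherlockValidString := by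
  intro s _ hpre
  unfold Spec_SherlockValidString
  rcases hcs : s.toList with _ | ⟨c0, rest⟩
  · exact absurd hcs hpre
  · have hA : SherlockValidString s =
        (if aAllEq ((ctab (c0 :: rest)).map (·.2)) then true
         else (List.range ((ctab (c0 :: rest)).map (·.2)).length).any
           (fun i => aAllEq (aDec ((ctab (c0 :: rest)).map (·.2)) i))) := by
      simp only [SherlockValidString, hcs]
      rw [ctab_init, aFold]
      rfl
    have hV : (ctab (c0 :: rest)).map (·.2)
        = (PySem.List.dedup (c0 :: rest)).map (fun k => ((c0 :: rest).count k : Int)) := by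
      rw [ctab, List.map_map]
      rfl
    set V : List Int := (PySem.List.dedup (c0 :: rest)).map (fun k => ((c0 :: rest).count k : Int)) with hVdef
    have hB : SherlockValidString_alt s =
        (match PySem.List.min? V (fun v => v), PySem.List.max? V (fun v => v) with
        | some m, some M =>
            (m == M) ||
            (M == m + 1 && ((PySem.List.count V M : Int) == 1)) ||
            (m == 1 && ((PySem.List.count V 1 : Int) == 1) &&
              ((PySem.List.count V M : Int) == (V.length : Int) - 1))
        | _, _ => false) := by
      simp only [SherlockValidString_alt, hcs]
      rw [← PySem.Dict.counter_eq_foldl]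
      have hvals : (PySem.Dict.counter (c0 :: rest)).values = V := by
        show ((PySem.Dict.counter (c0 :: rest)).items).map (·.2) = V
        rw [PySem.Dict.items_counter, List.map_map, hVdef, PySem.List.dedup_eq_ofList]
        rfl
      rw [hvals]
    rw [hA, hV, hB]
    have hVne : V ≠ [] := by
      rw [hVdef]
      intro h
      rw [List.map_eq_nil_iff] at h
      have : c0 ∈ PySem.List.dedup (c0 :: rest) :=
        (PySem.List.mem_dedup _ c0).mpr List.mem_cons_self
      rw [h] at this
      cases this
    have hVpos : ∀ x ∈ V, 1 ≤ x := by
      intro x hx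
      rw [hVdef] at hx
      rcases List.mem_map.mp hx with ⟨k, hk, rfl⟩
      have hkcs : k ∈ c0 :: rest := (PySem.List.mem_dedup _ k).mp hk
      have := List.count_pos_iff.mpr hkcs
      exact_mod_cast this
    rcases hmin : PySem.List.min? V (fun v => v) with _ | m
    · exact absurd ((PySem.List.min?_eq_none_iff V _).mp hmin) hVne
    rcases hmax : PySem.List.max? V (fun v => v) with _ | M
    · exact absurd ((PySem.List.max?_eq_none_iff V _).mp hmax) hVne
    simp only [PySem.List.count_eq]
    exact core V hVne hVpos m M (PySem.List.min?_mem hmin)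
      (PySem.List.min?_isMin hmin) (PySem.List.max?_mem hmax)
      (PySem.List.max?_isMax hmax)
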